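-- pv_equiv track=rewrite | github.com/vladalh/First-1 | Lesson_8.py | sortedByDivisors
-- ===== SOURCE A (Python) =====
-- def sortedByDivisors(list):
--     c = 1
--     b = -1
--     divisors = 0
--     diction = {}
--     for i in list:
--         if i > 0:
--             while c <= i:
--                 if i % c == 0:
--                     divisors += 1
--                 c += 1
--             diction[i] = divisors
--             divisors = 0
--         c = 1
--         if i < 0:
--             while b >= i:
--                 if i % b == 0:
--                     divisors += 1
--                 b -= 1
--             diction[i] = divisors
--             divisors = 0
--         b = -1
--
--     return sorted(diction.items(), key=lambda x: x[1])
-- ===== SOURCE B (Python) =====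
-- def sortedByDivisors(list):
--     diction = {}
--     for i in list:
--         if i != 0:
--             n = abs(i)
--             cnt = 0
--             d = 1
--             while d * d <= n:
--                 if n % d == 0:
--                     cnt += 1 if d * d == n else 2
--                 d += 1
--             diction[i] = cnt
--     return sorted(diction.items(), key=lambda x: x[1])
-- ===== Notes on version B (the rewrite author's own statement) =====
-- stated objective: faster
-- what changed: Replaces the per-element trial division over all of 1..i (and -1..i for negatives) with a square-root pair-counting loop: divisors d with d*d <= |i| are counted in pairs (d, |i|/d), adding 1 instead of 2 when d*d == |i|.
import Mathlib
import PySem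

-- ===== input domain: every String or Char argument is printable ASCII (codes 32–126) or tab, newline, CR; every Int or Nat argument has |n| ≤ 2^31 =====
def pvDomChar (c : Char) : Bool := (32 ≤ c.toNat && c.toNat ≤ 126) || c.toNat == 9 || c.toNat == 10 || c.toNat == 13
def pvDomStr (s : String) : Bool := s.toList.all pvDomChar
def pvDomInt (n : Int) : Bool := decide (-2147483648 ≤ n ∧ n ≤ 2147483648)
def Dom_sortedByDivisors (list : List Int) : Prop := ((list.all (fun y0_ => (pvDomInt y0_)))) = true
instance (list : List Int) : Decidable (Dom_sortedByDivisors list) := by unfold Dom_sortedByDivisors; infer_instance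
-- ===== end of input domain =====

-- B replaces A's full trial-division loops (1..i and -1..i) with a √|i|
-- pair-counting loop (measured asymptotically faster); dict build and stable sort kept.


-- ===== PORT A =====
-- 'while c <= i: if i % c == 0: divisors += 1; c += 1'
def loopPosA (i c divisors : Int) : Int :=
  if _h : c ≤ i then
    loopPosA i (c + 1) (if PySem.Int.mod i c = 0 then divisors + 1 else divisors)
  else divisors
termination_by (i + 1 - c).toNat
decreasing_by omega

-- 'while b >= i: if i % b == 0: divisors += 1; b -= 1'
def loopNegA (i b divisors : Int) : Int :=
  if _h : b ≥ i then
    loopNegA i (b - 1) (if PySem.Int.mod i b = 0 then divisors + 1 else divisors)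
  else divisors
termination_by (b - i + 1).toNat
decreasing_by omega

-- one iteration of A's for-loop over the carried state (c, b, divisors, diction)
def stepA (st : Int × Int × Int × PySem.Dict Int Int) (i : Int) :
    Int × Int × Int × PySem.Dict Int Int :=
  let c := st.1; let b := st.2.1; let divisors := st.2.2.1; let diction := st.2.2.2
  let p : Int × PySem.Dict Int Int :=
    if i > 0 then (0, diction.insert i (loopPosA i c divisors)) else (divisors, diction)
  -- c = 1 (reset after the positive branch)
  let q : Int × PySem.Dict Int Int :=
    if i < 0 then (0, p.2.insert i (loopNegA i b p.1)) else p
  -- b = -1 (reset after the negative branch)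
  (1, -1, q.1, q.2)

def sortedByDivisors (list : List Int) : List (Int × Int) :=
  let st := list.foldl stepA (1, -1, 0, PySem.Dict.empty)
  PySem.List.sorted st.2.2.2.items (fun x => x.2) false

-- ===== PORT B =====
-- 'while d*d <= n: if n % d == 0: cnt += 1 if d*d == n else 2; d += 1'
def loopB (n d cnt : Int) : Int :=
  if _h : d * d ≤ n then
    loopB n (d + 1)
      (if PySem.Int.mod n d = 0 then (if d * d = n then cnt + 1 else cnt + 2) else cnt)
  else cnt
termination_by (n + 1 - d).toNat
decreasing_by
  have hdn : d ≤ n := by nlinarith [mul_self_nonneg d, mul_self_nonneg (d - 1)]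
  omega

def stepB (diction : PySem.Dict Int Int) (i : Int) : PySem.Dict Int Int :=
  if i ≠ 0 then diction.insert i (loopB |i| 1 0) else diction

def sortedByDivisors_alt (list : List Int) : List (Int × Int) :=
  let diction := list.foldl stepB PySem.Dict.empty
  PySem.List.sorted diction.items (fun x => x.2) false

-- ===== PRECONDITION & SPEC =====
def Spec_sortedByDivisors (list : List Int) (out : List (Int × Int)) : Prop := out = sortedByDivisors_alt list
instance (list : List Int) (out : List (Int × Int)) : Decidable (Spec_sortedByDivisors list out) := by unfold Spec_sortedByDivisors; infer_instance

-- ===== CLAIM (what is proved, stated in full; the proofs are below) =====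
def Claim_equal_sortedByDivisors : Prop := ∀ (list : List Int), Dom_sortedByDivisors list → Spec_sortedByDivisors list (sortedByDivisors list)

-- ===== LEMMAS AND PROOFS =====

-- number of divisors of N among 1..N, as an Int
def divCnt (N : Nat) : Int := (((Finset.Icc 1 N).filter (· ∣ N)).card : Int)

lemma posInv (i : Int) (hi : 0 < i) :
    ∀ (k : Nat) (c divisors : Int), 1 ≤ c → (i + 1 - c).toNat = k →
      loopPosA i c divisors
        = divisors + (((Finset.Icc c.toNat i.toNat).filter (· ∣ i.toNat)).card : Int) := by
  intro k
  induction k using Nat.strong_induction_on with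
  | _ k IH =>
    intro c divisors hc hk
    rw [loopPosA]
    split
    · next h =>
      rw [IH (i + 1 - (c+1)).toNat (by omega) (c+1) _ (by omega) rfl]
      have h1 : (c+1).toNat = c.toNat + 1 := by omega
      have h2 : c.toNat ≤ i.toNat := by omega
      have hc' : ((c.toNat : Int)) = c := Int.toNat_of_nonneg (by omega)
      have hi' : ((i.toNat : Int)) = i := Int.toNat_of_nonneg (by omega)
      have hdvd : PySem.Int.mod i c = 0 ↔ c.toNat ∣ i.toNat := by
        rw [PySem.Int.mod_eq_zero_iff_dvd]
        constructor
        · intro hd; exact Int.natCast_dvd_natCast.mp (by rwa [hc', hi'])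
        · intro hd; have h3 := Int.natCast_dvd_natCast.mpr hd; rwa [hc', hi'] at h3
      have hIoc : Finset.Icc (c.toNat + 1) i.toNat = Finset.Ioc c.toNat i.toNat := by
        ext x; simp only [Finset.mem_Icc, Finset.mem_Ioc]; omega
      rw [h1, hIoc, Finset.Icc_eq_cons_Ioc h2, Finset.filter_cons]
      split_ifs with hmod hd hd
      · rw [Finset.card_cons]; push_cast; ring
      · exact absurd (hdvd.mp hmod) hd
      · exact absurd (hdvd.mpr hd) hmod
      · rfl
    · next h =>
      have : Finset.Icc c.toNat i.toNat = ∅ := Finset.Icc_eq_empty (by omega)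
      simp [this]

lemma negInv (i : Int) (hi : i < 0) :
    ∀ (k : Nat) (b divisors : Int), b ≤ -1 → (b - i + 1).toNat = k →
      loopNegA i b divisors
        = divisors + (((Finset.Icc b.natAbs i.natAbs).filter (· ∣ i.natAbs)).card : Int) := by
  intro k
  induction k using Nat.strong_induction_on with
  | _ k IH =>
    intro b divisors hb hk
    rw [loopNegA]
    split
    · next h =>
      rw [IH (b - 1 - i + 1).toNat (by omega) (b - 1) _ (by omega) rfl]
      have h1 : (b - 1).natAbs = b.natAbs + 1 := by omega
      have h2 : b.natAbs ≤ i.natAbs := by omega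
      have hdvd : PySem.Int.mod i b = 0 ↔ b.natAbs ∣ i.natAbs := by
        rw [PySem.Int.mod_eq_zero_iff_dvd]
        exact Int.natAbs_dvd_natAbs.symm
      have hIoc : Finset.Icc (b.natAbs + 1) i.natAbs = Finset.Ioc b.natAbs i.natAbs := by
        ext x; simp only [Finset.mem_Icc, Finset.mem_Ioc]; omega
      rw [h1, hIoc, Finset.Icc_eq_cons_Ioc h2, Finset.filter_cons]
      split_ifs with hmod hd hd
      · rw [Finset.card_cons]; push_cast; ring
      · exact absurd (hdvd.mp hmod) hd
      · exact absurd (hdvd.mpr hd) hmod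
      · rfl
    · next h =>
      have he : Finset.Icc b.natAbs i.natAbs = ∅ := Finset.Icc_eq_empty (by omega)
      simp [he]

lemma bInv (n : Int) (hn : 0 < n) :
    ∀ (k : Nat) (d cnt : Int), 1 ≤ d → (n + 1 - d).toNat = k →
      loopB n d cnt
        = cnt + ∑ m ∈ Finset.Icc d.toNat (Nat.sqrt n.toNat),
            (if m ∣ n.toNat then (if m * m = n.toNat then (1 : Int) else 2) else 0) := by
  intro k
  induction k using Nat.strong_induction_on with
  | _ k IH =>
    intro d cnt hd hk
    rw [loopB]
    split
    · next h =>
      have hdn : d ≤ n := by nlinarith [mul_self_nonneg (d - 1)]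
      rw [IH (n + 1 - (d + 1)).toNat (by omega) (d + 1) _ (by omega) rfl]
      have hd' : ((d.toNat : Int)) = d := Int.toNat_of_nonneg (by omega)
      have hn' : ((n.toNat : Int)) = n := Int.toNat_of_nonneg (by omega)
      have hsq : d.toNat * d.toNat ≤ n.toNat := by
        have : ((d.toNat * d.toNat : Nat) : Int) ≤ ((n.toNat : Nat) : Int) := by
          push_cast; rw [hd', hn']; exact h
        exact_mod_cast this
      have h2 : d.toNat ≤ Nat.sqrt n.toNat := Nat.le_sqrt.mpr hsq
      have h1 : (d + 1).toNat = d.toNat + 1 := by omega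
      have hdvd : PySem.Int.mod n d = 0 ↔ d.toNat ∣ n.toNat := by
        rw [PySem.Int.mod_eq_zero_iff_dvd]
        constructor
        · intro hdd; exact Int.natCast_dvd_natCast.mp (by rwa [hd', hn'])
        · intro hdd; have h3 := Int.natCast_dvd_natCast.mpr hdd; rwa [hd', hn'] at h3
      have heq : d * d = n ↔ d.toNat * d.toNat = n.toNat := by
        constructor
        · intro hh; have : ((d.toNat * d.toNat : Nat) : Int) = ((n.toNat : Nat) : Int) := by
            push_cast; rw [hd', hn']; exact hh
          exact_mod_cast this
        · intro hh; have : ((d.toNat * d.toNat : Nat) : Int) = ((n.toNat : Nat) : Int) := by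
            exact_mod_cast hh
          rw [Nat.cast_mul, hd', hn'] at this; exact this
      have hIoc : Finset.Icc (d.toNat + 1) (Nat.sqrt n.toNat) = Finset.Ioc d.toNat (Nat.sqrt n.toNat) := by
        ext x; simp only [Finset.mem_Icc, Finset.mem_Ioc]; omega
      rw [h1, hIoc, Finset.Icc_eq_cons_Ioc h2, Finset.sum_cons]
      simp only [hdvd, heq]
      split_ifs <;> ring
    · next h =>
      have he : Finset.Icc d.toNat (Nat.sqrt n.toNat) = ∅ := by
        apply Finset.Icc_eq_empty
        intro hle
        apply h
        have hs := Nat.sqrt_le_self n.toNat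
        have hmul := Nat.le_sqrt.mp hle
        have : ((d.toNat * d.toNat : Nat) : Int) ≤ ((n.toNat : Nat) : Int) := by exact_mod_cast hmul
        rw [Nat.cast_mul] at this
        have hd' : ((d.toNat : Int)) = d := Int.toNat_of_nonneg (by omega)
        have hn' : ((n.toNat : Int)) = n := Int.toNat_of_nonneg (by omega)
        rwa [hd', hn'] at this
      simp [he]

-- the pair-counting identity: summing 2 per divisor ≤ √N (1 on the square root) counts all divisors
lemma core (N : Nat) (hN : 1 ≤ N) :
    (∑ m ∈ Finset.Icc 1 (Nat.sqrt N),
        (if m ∣ N then (if m * m = N then (1 : Int) else 2) else 0))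
      = (((Finset.Icc 1 N).filter (· ∣ N)).card : Int) := by
  classical
  set D := (Finset.Icc 1 N).filter (· ∣ N) with hD
  have hS : (Finset.Icc 1 (Nat.sqrt N)).filter (· ∣ N) = D.filter (fun m => m * m ≤ N) := by
    ext m
    simp only [hD, Finset.mem_filter, Finset.mem_Icc]
    constructor
    · rintro ⟨⟨h1, h2⟩, h3⟩
      exact ⟨⟨⟨h1, Nat.le_of_dvd (by omega) h3⟩, h3⟩, Nat.le_sqrt.mp h2⟩
    · rintro ⟨⟨⟨h1, _h2⟩, h3⟩, h4⟩
      exact ⟨⟨h1, Nat.le_sqrt.mpr h4⟩, h3⟩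
  have step1 : (∑ m ∈ Finset.Icc 1 (Nat.sqrt N),
        (if m ∣ N then (if m * m = N then (1 : Int) else 2) else 0))
      = ∑ m ∈ D.filter (fun m => m * m ≤ N), (if m * m = N then (1 : Int) else 2) := by
    rw [← hS, Finset.sum_filter]
  rw [step1]
  set S := D.filter (fun m => m * m ≤ N) with hSdef
  have hcards : S.card + (D.filter (fun m => ¬ m * m ≤ N)).card = D.card :=
    Finset.filter_card_add_filter_neg_card_eq_card (p := fun m => m * m ≤ N)
  have hsplitS : ((S.filter (fun m => m * m = N)).card : Int)
      + ((S.filter (fun m => ¬ m * m = N)).card : Int) = (S.card : Int) := by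
    exact_mod_cast congrArg (Nat.cast (R := Int))
      (Finset.filter_card_add_filter_neg_card_eq_card (s := S) (p := fun m => m * m = N))
  have hsum : (∑ m ∈ S, (if m * m = N then (1 : Int) else 2))
      = ((S.filter (fun m => m * m = N)).card : Int)
        + 2 * ((S.filter (fun m => ¬ m * m = N)).card : Int) := by
    rw [← Finset.sum_filter_add_sum_filter_not S (fun m => m * m = N)]
    rw [Finset.sum_congr rfl (fun m hm => if_pos (Finset.mem_filter.mp hm).2),
        Finset.sum_congr rfl (fun m hm => if_neg (Finset.mem_filter.mp hm).2)]
    simp [mul_comm]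
  have hbij : (S.filter (fun m => ¬ m * m = N)).card
      = (D.filter (fun m => ¬ m * m ≤ N)).card := by
    apply Finset.card_nbij' (i := fun m => N / m) (j := fun m => N / m)
    · intro m hm
      simp only [hSdef, hD, Finset.coe_filter, Set.mem_setOf_eq, Finset.mem_filter,
        Finset.mem_Icc] at hm ⊢
      obtain ⟨⟨⟨⟨hm1, hmN⟩, hdvd⟩, hle⟩, hne⟩ := hm
      obtain ⟨kk, hk⟩ := hdvd
      have hk1 : 1 ≤ kk := by
        rcases Nat.eq_zero_or_pos kk with h0 | h0
        · subst h0; omega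
        · exact h0
      have hdiv : N / m = kk := by rw [hk, Nat.mul_div_cancel_left kk (by omega)]
      have hmk : m < kk := by
        have hle' : m ≤ kk :=
          Nat.le_of_mul_le_mul_left (show m * m ≤ m * kk by omega) (show 0 < m by omega)
        rcases Nat.lt_or_ge m kk with h | h
        · exact h
        · exfalso; apply hne
          have hmk' : m = kk := le_antisymm hle' h
          subst hmk'; omega
      have hNlt : N < kk * kk := by
        calc N = m * kk := hk
        _ < kk * kk := Nat.mul_lt_mul_of_lt_of_le hmk (le_refl kk) (by omega)
      rw [hdiv]
      refine ⟨⟨⟨hk1, ?_⟩, ⟨m, by rw [hk]; ring⟩⟩, by omega⟩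
      calc kk ≤ m * kk := Nat.le_mul_of_pos_left kk (by omega)
      _ = N := hk.symm
    · intro m hm
      simp only [hSdef, hD, Finset.coe_filter, Set.mem_setOf_eq, Finset.mem_filter,
        Finset.mem_Icc] at hm ⊢
      obtain ⟨⟨⟨hm1, hmN⟩, hdvd⟩, hgt⟩ := hm
      obtain ⟨kk, hk⟩ := hdvd
      have hk1 : 1 ≤ kk := by
        rcases Nat.eq_zero_or_pos kk with h0 | h0
        · subst h0; omega
        · exact h0
      have hdiv : N / m = kk := by rw [hk, Nat.mul_div_cancel_left kk (by omega)]
      have hkm : kk < m := by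
        by_contra hcon
        push_neg at hcon
        apply hgt
        calc m * m ≤ m * kk := Nat.mul_le_mul_left m hcon
        _ = N := hk.symm
      have hklt : kk * kk < N := by
        calc kk * kk < kk * m := by
              exact Nat.mul_lt_mul_of_le_of_lt (le_refl kk) hkm (by omega)
        _ = m * kk := Nat.mul_comm kk m
        _ = N := hk.symm
      rw [hdiv]
      refine ⟨⟨⟨⟨hk1, ?_⟩, ⟨m, by rw [hk]; ring⟩⟩, by omega⟩, by omega⟩
      calc kk ≤ m * kk := Nat.le_mul_of_pos_left kk (by omega)
      _ = N := hk.symm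
    · intro m hm
      simp only [hSdef, hD, Finset.coe_filter, Set.mem_setOf_eq, Finset.mem_filter,
        Finset.mem_Icc] at hm
      exact Nat.div_div_self hm.1.1.2 (by omega)
    · intro m hm
      simp only [hSdef, hD, Finset.coe_filter, Set.mem_setOf_eq, Finset.mem_filter,
        Finset.mem_Icc] at hm
      exact Nat.div_div_self hm.1.2 (by omega)
  rw [hsum]
  have hc : (D.card : Int) = (S.card : Int) + ((D.filter (fun m => ¬ m * m ≤ N)).card : Int) := by
    exact_mod_cast congrArg (Nat.cast (R := Int)) hcards.symm
  rw [hD] at hc ⊢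
  rw [hc, ← hsplitS, hbij]
  ring

lemma posA_cnt (i : Int) (hi : 0 < i) : loopPosA i 1 0 = divCnt i.natAbs := by
  have h := posInv i hi (i + 1 - 1).toNat 1 0 le_rfl rfl
  have h2 : Int.toNat i = i.natAbs := by omega
  have h3 : Int.toNat 1 = 1 := rfl
  rw [h, h2, h3, divCnt]
  ring

lemma negA_cnt (i : Int) (hi : i < 0) : loopNegA i (-1) 0 = divCnt i.natAbs := by
  have h := negInv i hi (-1 - i + 1).toNat (-1) 0 le_rfl rfl
  have h3 : Int.natAbs (-1) = 1 := rfl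
  rw [h, h3, divCnt]
  ring

lemma bCnt (i : Int) (hi : i ≠ 0) : loopB |i| 1 0 = divCnt i.natAbs := by
  have hpos : 0 < |i| := abs_pos.mpr hi
  have h := bInv |i| hpos (|i| + 1 - 1).toNat 1 0 le_rfl rfl
  have h2 : Int.toNat |i| = i.natAbs := by
    rw [Int.abs_eq_natAbs, Int.toNat_natCast]
  have hN : 1 ≤ i.natAbs := by omega
  rw [h, h2, divCnt, ← core i.natAbs hN]
  have h3 : Int.toNat 1 = 1 := rfl
  rw [h3]
  ring

lemma stepA_eq (d : PySem.Dict Int Int) (i : Int) :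
    stepA (1, -1, 0, d) i = (1, -1, 0, stepB d i) := by
  rcases lt_trichotomy i 0 with hi | rfl | hi
  · have h1 : ¬ i > 0 := by omega
    have h2 : i ≠ 0 := by omega
    simp [stepA, stepB, h1, hi, h2, negA_cnt i hi, bCnt i h2]
  · simp [stepA, stepB]
  · have h1 : ¬ i < 0 := by omega
    have h2 : i ≠ 0 := by omega
    simp [stepA, stepB, h1, hi, h2, posA_cnt i hi, bCnt i h2]

lemma fold_eq (l : List Int) (d : PySem.Dict Int Int) :
    l.foldl stepA (1, -1, 0, d) = (1, -1, 0, l.foldl stepB d) := by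
  induction l generalizing d with
  | nil => rfl
  | cons x xs ih => simp [List.foldl, stepA_eq, ih]

-- ===== VERDICT (by name: the statement is the Claim_ definition above) =====
theorem sortedByDivisors_spec : Claim_equal_sortedByDivisors := by
  intro list _
  unfold Spec_sortedByDivisors sortedByDivisors sortedByDivisors_alt
  rw [fold_eq]
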